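-- pv_equiv track=rewrite | github.com/nAmOmOwOn/MyStudy | My_practice_Quiz/10_Quiz_level2.py | solution
-- ===== SOURCE A (Python) =====
-- def solution(n, m, section):
--     result = 0 # 결과값 저장할 곳
--     nsection = [] # 벽 공간 인덱스로 표현하기 위한 리스트
--
--     for i in range(1,n+1):
--         nsection.append(i)
--
--     for i in range(0,len(nsection)):
--         for j in range(0,len(section)):
--             if nsection[i] == section[j]:
--                 nsection[i] = 0 # 덧칠해야 하는 구역 값 변경
--
--     for i in range(m-1,len(nsection)+1):
--         if nsection[i-m] == 0 and 0 in nsection[i-m:i]: #롤러를 다시 칠해야 하는 구간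
--             result += 1
--
--     return result
-- ===== SOURCE B (Python) =====
-- def solution(n, m, section):
--     # count the distinct section values that are valid repaint-start positions,
--     # i.e. lie in [1, n - m + 1]
--     return len({s for s in section if 1 <= s <= n - m + 1})
-- ===== Notes on version B (the rewrite author's own statement) =====
-- stated objective: faster
-- what changed: Replaces the materialised wall list, the O(n*len(section)) marking pass and the O(n*m) slice-scanning pass by a single set comprehension counting the distinct section values in [1, n-m+1].
-- intended difference: When m = n+1 with n >= 1 and n in section, A's negative-index wraparound nsection[-1] counts a phantom roller position and returns 1, while B returns 0, the intended count since no position in [1, n-m+1] exists when the roller is longer than the wall. — e.g. on solution(2, 3, [2]): A returns 1, B returns 0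
import Mathlib
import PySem

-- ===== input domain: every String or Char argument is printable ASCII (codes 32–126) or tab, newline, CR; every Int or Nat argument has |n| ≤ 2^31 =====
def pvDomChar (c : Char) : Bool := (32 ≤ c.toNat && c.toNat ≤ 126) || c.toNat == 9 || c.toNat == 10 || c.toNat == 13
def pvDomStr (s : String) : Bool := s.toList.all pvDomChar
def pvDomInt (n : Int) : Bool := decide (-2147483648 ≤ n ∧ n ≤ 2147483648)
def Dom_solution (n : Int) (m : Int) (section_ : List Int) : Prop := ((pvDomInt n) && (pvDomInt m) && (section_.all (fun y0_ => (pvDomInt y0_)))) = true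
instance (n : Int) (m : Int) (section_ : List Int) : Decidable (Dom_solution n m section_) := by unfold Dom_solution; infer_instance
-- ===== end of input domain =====

-- B replaces A's wall-marking and slice-scanning loops by one pass counting the distinct
-- section values in [1, n-m+1] (measured asymptotically faster); on m = n+1 with n in
-- section, A's negative-index wraparound yields 1 where B returns the intended 0 (see D_).


-- ===== PORT A =====
-- A mutates its wall list in place with O(1) indexing/assignment/append, so it is ported
-- on Array Int; pyIdxA/aGet/aSet/aSlice hand-port Python's (possibly negative) indexing and
-- slice clamping, exact wherever A does not raise (aGet/aSet defaults are reached only on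
-- out-of-range indices, i.e. only outside Pre_solution).
def pyIdxA (size : Nat) (i : Int) : Int := if i < 0 then i + size else i

def aGet (xs : Array Int) (i : Int) : Int := xs.getD (pyIdxA xs.size i).toNat 0

def aSet (xs : Array Int) (i : Int) (v : Int) : Array Int :=
  xs.setIfInBounds (pyIdxA xs.size i).toNat v

def aSlice (xs : Array Int) (a b : Int) : Array Int :=
  xs.extract (max (pyIdxA xs.size a) 0).toNat (max (pyIdxA xs.size b) 0).toNat

def solution (n : Int) (m : Int) (section_ : List Int) : Int :=
  let ns0 : Array Int :=
    (PySem.List.pyRange 1 (n + 1) 1).foldl (fun acc i => acc.push i) #[]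
  let ns1 : Array Int :=
    (PySem.List.pyRange 0 (ns0.size : Int) 1).foldl (fun ns i =>
      (PySem.List.pyRange 0 (section_.length : Int) 1).foldl (fun ns j =>
        if aGet ns i = PySem.List.pyGetD section_ j 0
        then aSet ns i 0 else ns) ns) ns0
  (PySem.List.pyRange (m - 1) ((ns1.size : Int) + 1) 1).foldl (fun result i =>
    if aGet ns1 (i - m) = 0 ∧ (0 : Int) ∈ (aSlice ns1 (i - m) i).toList
    then result + 1 else result) 0

-- ===== PORT B =====
def solution_alt (n : Int) (m : Int) (section_ : List Int) : Int :=
  ((PySem.Set.ofList (section_.filter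
      (fun s => decide (1 ≤ s) && decide (s ≤ n - m + 1)))).length : Int)

-- ===== PRECONDITION & SPEC =====
-- Pre_ excludes exactly the inputs where A raises IndexError (third loop indexes an empty
-- wall list, or runs past the end when m ≤ 0).
def Pre_solution (n : Int) (m : Int) (section_ : List Int) : Prop :=
  (1 ≤ n ∧ 1 ≤ m) ∨ (n ≤ 0 ∧ 2 ≤ m)
instance (n : Int) (m : Int) (section_ : List Int) : Decidable (Pre_solution n m section_) := by unfold Pre_solution; infer_instance
def pvWitness_solution : Int × Int × List Int := (3, 2, [1, 2])

-- When m = n+1 with n ≥ 1 and n ∈ section, A's negative-index wraparound nsection[-1]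
-- counts a phantom roller position and returns 1; B returns 0, the intended count, since
-- no position in [1, n-m+1] exists when the roller is longer than the wall.
def D_solution (n : Int) (m : Int) (section_ : List Int) : Prop :=
  m = n + 1 ∧ 1 ≤ n ∧ n ∈ section_
instance (n : Int) (m : Int) (section_ : List Int) : Decidable (D_solution n m section_) := by unfold D_solution; infer_instance

def Spec_solution (n : Int) (m : Int) (section_ : List Int) (out : Int) : Prop :=
  ¬ D_solution n m section_ → out = solution_alt n m section_
instance (n : Int) (m : Int) (section_ : List Int) (out : Int) : Decidable (Spec_solution n m section_ out) := by unfold Spec_solution; infer_instance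

def pvDiffWitness_solution : Int × Int × List Int := (2, 3, [2])
def pvDiffWitnessOut_solution : Int × Int := (1, 0)

-- ===== CLAIM (what is proved, stated in full; the proofs are below) =====
def Claim_unchanged_solution : Prop := ∀ (n : Int) (m : Int) (section_ : List Int), Dom_solution n m section_ → Pre_solution n m section_ → Spec_solution n m section_ (solution n m section_)
def Claim_changed_solution : Prop := Dom_solution (pvDiffWitness_solution.1) (pvDiffWitness_solution.2.1) (pvDiffWitness_solution.2.2) ∧ Pre_solution (pvDiffWitness_solution.1) (pvDiffWitness_solution.2.1) (pvDiffWitness_solution.2.2) ∧ D_solution (pvDiffWitness_solution.1) (pvDiffWitness_solution.2.1) (pvDiffWitness_solution.2.2) ∧ solution (pvDiffWitness_solution.1) (pvDiffWitness_solution.2.1) (pvDiffWitness_solution.2.2) = pvDiffWitnessOut_solution.1 ∧ solution_alt (pvDiffWitness_solution.1) (pvDiffWitness_solution.2.1) (pvDiffWitness_solution.2.2) = pvDiffWitnessOut_solution.2 ∧ pvDiffWitnessOut_solution.1 ≠ pvDiffWitnessOut_solution.2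
def Claim_exact_solution : Prop := ∀ (n : Int) (m : Int) (section_ : List Int), Dom_solution n m section_ → Pre_solution n m section_ → D_solution n m section_ → solution n m section_ ≠ solution_alt n m section_

-- ===== LEMMAS AND PROOFS =====

def markf (sec : List Int) (v : Int) : Int := if v ∈ sec then 0 else v

theorem aGet_eq (xs : Array Int) (i : Int) (h0 : 0 ≤ i) (h1 : i < (xs.size : Int)) :
    aGet xs i = xs.toList[i.toNat]'(by rw [Array.length_toList]; omega) := by
  have hlt : i.toNat < xs.size := by omega
  simp [aGet, pyIdxA, if_neg (by omega : ¬ i < 0), Array.getD_eq_getD_getElem?,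
        Array.getElem?_eq_getElem hlt, Array.getElem_toList hlt]

theorem aGet_neg_one (xs : Array Int) (h : 1 ≤ xs.size) :
    aGet xs (-1) = xs.toList[xs.size - 1]'(by rw [Array.length_toList]; omega) := by
  have hlt : ((-1 : Int) + xs.size).toNat = xs.size - 1 := by omega
  have hlt2 : xs.size - 1 < xs.size := by omega
  simp [aGet, pyIdxA, hlt, Array.getD_eq_getD_getElem?,
        Array.getElem?_eq_getElem hlt2, Array.getElem_toList hlt2]

theorem aSet_toList (xs : Array Int) (i : Int) (v : Int) (h0 : 0 ≤ i) :
    (aSet xs i v).toList = xs.toList.set i.toNat v := by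
  simp [aSet, pyIdxA, if_neg (by omega : ¬ i < 0), Array.toList_setIfInBounds]

theorem aSet_size (xs : Array Int) (i : Int) (v : Int) : (aSet xs i v).size = xs.size := by
  simp [aSet, Array.size_setIfInBounds]

theorem aSlice_toList_nonneg (xs : Array Int) (a b : Int) (h0 : 0 ≤ a) (hb : 0 ≤ b) :
    (aSlice xs a b).toList = (xs.toList.drop a.toNat).take (b.toNat - a.toNat) := by
  have h1 : max (pyIdxA xs.size a) 0 = a := by simp [pyIdxA]; omega
  have h2 : max (pyIdxA xs.size b) 0 = b := by simp [pyIdxA]; omega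
  simp [aSlice, h1, h2, Array.toList_extract, List.extract_eq_take_drop]

theorem aSlice_toList_neg_one (xs : Array Int) (b : Int) (hs : 1 ≤ xs.size) (hb : 0 ≤ b) :
    (aSlice xs (-1) b).toList
      = (xs.toList.drop (xs.size - 1)).take (b.toNat - (xs.size - 1)) := by
  have h1 : (max (pyIdxA xs.size (-1)) 0).toNat = xs.size - 1 := by simp [pyIdxA]; omega
  have h2 : (max (pyIdxA xs.size b) 0).toNat = b.toNat := by simp [pyIdxA]; omega
  simp [aSlice, h1, h2, Array.toList_extract, List.extract_eq_take_drop]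

theorem toList_push_foldl (l : List Int) (a : Array Int) :
    (l.foldl (fun acc i => acc.push i) a).toList = a.toList ++ l := by
  induction l generalizing a with
  | nil => simp
  | cons x t ih => simp only [List.foldl_cons]; rw [ih]; simp

theorem inner_loopA (sec : List Int) (i : Int) : ∀ (arr : Array Int), 0 ≤ i → i < (arr.size : Int) →
    (sec.foldl (fun ns s => if aGet ns i = s then aSet ns i 0 else ns) arr).toList
      = arr.toList.set i.toNat (markf sec (aGet arr i)) := by
  induction sec with
  | nil =>
    intro arr h0 h1
    simp only [List.foldl_nil, markf, List.not_mem_nil, if_neg (not_false)]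
    rw [aGet_eq _ _ h0 h1, List.set_getElem_self]
  | cons s t ih =>
    intro arr h0 h1
    have hlt : i.toNat < arr.size := by omega
    simp only [List.foldl_cons]
    by_cases h : aGet arr i = s
    · rw [if_pos h]
      have hsz : ((aSet arr i 0).size : Int) = arr.size := by rw [aSet_size]
      rw [ih _ h0 (by omega)]
      have e1 : aGet (aSet arr i 0) i = 0 := by
        rw [aGet_eq _ _ h0 (by omega)]
        simp [aSet_toList _ _ _ h0, List.getElem_set]
      rw [e1, aSet_toList _ _ _ h0, List.set_set]
      have e2 : markf (s :: t) (aGet arr i) = markf t 0 := by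
        simp only [markf, List.mem_cons, h]
        by_cases h2 : (0:Int) ∈ t <;> simp [h2]
      rw [e2]
    · rw [if_neg h, ih _ h0 h1]
      have : markf (s :: t) (aGet arr i) = markf t (aGet arr i) := by
        simp only [markf, List.mem_cons]
        by_cases h2 : aGet arr i ∈ t <;> simp [h2, h]
      rw [this]

theorem mark_loopA (sec : List Int) (suf : List Int) : ∀ (pre : List Int) (arr : Array Int),
    arr.toList = pre ++ suf →
    ((PySem.List.pyRange (pre.length : Int) ((pre.length : Int) + (suf.length : Int)) 1).foldl
      (fun ns i => sec.foldl (fun ns s => if aGet ns i = s then aSet ns i 0 else ns) ns) arr).toList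
    = pre ++ suf.map (markf sec) := by
  induction suf with
  | nil =>
    intro pre arr ha
    rw [PySem.List.pyRange_one_eq_nil (by simp)]
    simpa using ha
  | cons v t ih =>
    intro pre arr ha
    have hsz : arr.size = pre.length + (t.length + 1) := by
      rw [← Array.length_toList, ha]; simp
    rw [PySem.List.pyRange_one_cons (by push_cast [List.length_cons]; try omega)]
    simp only [List.foldl_cons]
    have hstepL : (sec.foldl
        (fun ns s => if aGet ns (pre.length : Int) = s then aSet ns (pre.length : Int) 0 else ns)
        arr).toList = (pre ++ [markf sec v]) ++ t := by
      rw [inner_loopA sec _ _ (by omega) (by omega)]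
      have hget : aGet arr (pre.length : Int) = v := by
        rw [aGet_eq _ _ (by omega) (by omega)]
        simp [ha]
      rw [hget, ha]
      simp
    have e1 : ((pre.length : Int) + 1) = (((pre ++ [markf sec v]).length : Nat) : Int) := by
      simp
    have e2 : ((pre.length : Int) + ((v :: t).length : Int))
        = (((pre ++ [markf sec v]).length : Nat) : Int) + (t.length : Int) := by
      simp; omega
    rw [e1, e2, ih (pre ++ [markf sec v]) _ hstepL]
    simp

theorem third_loopA (n m : Int) (sec : List Int) (A : Array Int)
    (hA : A.toList = (PySem.List.pyRange 1 (n+1) 1).map (markf sec))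
    (hn : 1 ≤ n) (hm : 1 ≤ m)
    (hD : ¬(m = n + 1 ∧ n ∈ sec)) :
    (PySem.List.pyRange (m - 1) ((A.size : Int) + 1) 1).foldl
      (fun result i =>
        if aGet A (i - m) = 0 ∧ (0:Int) ∈ (aSlice A (i - m) i).toList
        then result + 1 else result) 0
    = ((PySem.List.pyRange 1 (n - m + 2) 1).countP (fun k => decide (k ∈ sec)) : Int) := by
  set M := (PySem.List.pyRange 1 (n+1) 1).map (markf sec) with hM
  have hlen : M.length = n.toNat := by
    rw [hM, List.length_map, PySem.List.length_pyRange_one]; omega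
  have hsize : A.size = n.toNat := by rw [← Array.length_toList, hA, hlen]
  have hsizeI : ((A.size : Nat) : Int) = n := by omega
  have hMget : ∀ (k : Nat), (hk : k < M.length) → M[k] = markf sec (1 + (k : Int)) := by
    intro k hk
    simp [hM, List.getElem_map, PySem.List.getElem_pyRange_one]
  have hAget : ∀ (i : Int), 0 ≤ i → i < (A.size : Int) →
      aGet A i = markf sec (i + 1) := by
    intro i h0 h1
    rw [aGet_eq _ _ h0 h1]
    have : A.toList[i.toNat]'(by rw [Array.length_toList]; omega)
        = M[i.toNat]'(by omega) := by simp [hA]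
    rw [this, hMget _ (by omega)]
    congr 1; omega
  rw [hsizeI]
  rcases lt_trichotomy m (n + 1) with hmn | hmn | hmn
  · -- m ≤ n
    have hmn' : m ≤ n := by omega
    rw [PySem.List.pyRange_one_cons (by omega)]
    simp only [List.foldl_cons]
    -- first iteration i = m - 1 : empty slice, no count
    have hslice : (0:Int) ∉ (aSlice A (m - 1 - m) (m - 1)).toList := by
      have h1 : m - 1 - m = -1 := by ring
      rw [h1, aSlice_toList_neg_one _ _ (by omega) (by omega)]
      have h2 : (m-1).toNat - (A.size - 1) = 0 := by omega
      rw [h2, List.take_zero]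
      exact List.not_mem_nil
    rw [if_neg (by tauto)]
    rw [PySem.List.foldl_congr_mem' _ _
        (fun acc i => if (i - m + 1) ∈ sec then acc + 1 else acc) _ ?hcong]
    case hcong =>
      intro i hi acc
      dsimp only
      rw [PySem.List.mem_pyRange_one] at hi
      have ha0 : 0 ≤ i - m := by omega
      have ha1 : i - m < ((A.size : Nat) : Int) := by omega
      have hgd : aGet A (i - m) = markf sec (i - m + 1) := hAget _ ha0 ha1
      by_cases hs : (i - m + 1) ∈ sec
      · rw [if_pos hs, if_pos]
        constructor
        · rw [hgd]; simp [markf, hs]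
        · -- 0 is the first element of the slice
          have h0i : 0 ≤ i := by omega
          rw [aSlice_toList_nonneg _ _ _ ha0 h0i,
              List.drop_eq_getElem_cons (by rw [Array.length_toList]; omega :
                (i - m).toNat < A.toList.length)]
          have hk : i.toNat - (i - m).toNat = (m.toNat - 1) + 1 := by omega
          rw [hk, List.take_succ_cons]
          have he : A.toList[(i - m).toNat]'(by rw [Array.length_toList]; omega) = (0 : Int) := by
            rw [← aGet_eq _ _ ha0 ha1, hgd]
            simp [markf, hs]
          rw [he]; exact List.mem_cons_self ..
      · rw [if_neg hs, if_neg]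
        rintro ⟨h1, -⟩
        rw [hgd] at h1
        simp only [markf, if_neg hs] at h1
        omega
    rw [PySem.List.foldl_ite_add_one]
    have hs1 : m - 1 + 1 = m := by ring
    rw [hs1]
    rw [PySem.List.pyRange_one m (n+1), PySem.List.pyRange_one 1 (n - m + 2),
        List.countP_map, List.countP_map]
    have hr : (n - m + 2 - 1).toNat = (n + 1 - m).toNat := by omega
    rw [hr]
    norm_num
    apply List.countP_congr
    intro k hk
    simp only [Function.comp_apply]
    have he : m + (k : Int) - m + 1 = 1 + (k : Int) := by ring
    rw [he]
  · -- m = n + 1 : single iteration i = n, hits nsection[-1]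
    have hns : n ∉ sec := fun h => hD ⟨hmn, h⟩
    have h1 : m - 1 = n := by omega
    rw [h1, PySem.List.pyRange_one_cons (by omega),
        PySem.List.pyRange_one_eq_nil (by omega)]
    simp only [List.foldl_cons, List.foldl_nil]
    have h2 : n - m = -1 := by omega
    rw [h2]
    have hgl : aGet A (-1) = markf sec n := by
      rw [aGet_neg_one _ (by omega)]
      have : A.toList[A.size - 1]'(by rw [Array.length_toList]; omega)
          = M[A.size - 1]'(by omega) := by simp [hA]
      rw [this, hMget _ (by omega)]
      congr 1; omega
    rw [hgl]
    have : markf sec n ≠ 0 := by simp [markf, hns]; omega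
    rw [if_neg (by tauto)]
    rw [PySem.List.pyRange_one_eq_nil (by omega)]
    simp
  · -- m ≥ n + 2 : both sides empty
    rw [PySem.List.pyRange_one_eq_nil (by omega),
        PySem.List.pyRange_one_eq_nil (by omega : n - m + 2 ≤ 1)]
    simp

theorem keyB (n m : Int) (sec : List Int) :
    ((PySem.Set.ofList (sec.filter (fun s => decide (1 ≤ s) && decide (s ≤ n - m + 1)))).length : Int)
      = ((PySem.List.pyRange 1 (n - m + 2) 1).countP (fun k => decide (k ∈ sec)) : Int) := by
  set c : Int := n - m + 2 with hc
  have h1 : ((PySem.List.pyRange 1 c 1).filter (fun k => decide (k ∈ sec))).Nodup :=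
    (PySem.List.nodup_pyRange_one 1 c).filter _
  have h2 : (PySem.Set.ofList (sec.filter (fun s => decide (1 ≤ s) && decide (s ≤ n - m + 1)))).Nodup :=
    PySem.Set.nodup_ofList _
  have hp : (PySem.Set.ofList (sec.filter (fun s => decide (1 ≤ s) && decide (s ≤ n - m + 1)))).Perm
      ((PySem.List.pyRange 1 c 1).filter (fun k => decide (k ∈ sec))) := by
    rw [List.perm_ext_iff_of_nodup h2 h1]
    intro a
    rw [PySem.Set.mem_ofList]
    simp only [List.mem_filter, PySem.List.mem_pyRange_one, decide_eq_true_eq, Bool.and_eq_true]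
    constructor
    · rintro ⟨ha, h1a, h2a⟩; exact ⟨⟨h1a, by omega⟩, ha⟩
    · rintro ⟨⟨h1a, h2a⟩, ha⟩; exact ⟨ha, h1a, by omega⟩
  rw [List.countP_eq_length_filter, hp.length_eq]

theorem solution_count (n m : Int) (sec : List Int)
    (hPre : (1 ≤ n ∧ 1 ≤ m) ∨ (n ≤ 0 ∧ 2 ≤ m))
    (hD : ¬(m = n + 1 ∧ 1 ≤ n ∧ n ∈ sec)) :
    solution n m sec
      = ((PySem.List.pyRange 1 (n - m + 2) 1).countP (fun k => decide (k ∈ sec)) : Int) := by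
  unfold solution
  dsimp only
  have h0 : ((PySem.List.pyRange 1 (n + 1) 1).foldl (fun acc i => acc.push i) #[]).toList
      = PySem.List.pyRange 1 (n + 1) 1 := by
    rw [toList_push_foldl]; rfl
  have h0s : ((PySem.List.pyRange 1 (n + 1) 1).foldl (fun acc i => acc.push i) #[]).size
      = (PySem.List.pyRange 1 (n + 1) 1).length := by
    rw [← Array.length_toList, h0]
  have hcong : ∀ i ∈ PySem.List.pyRange 0
        ((((PySem.List.pyRange 1 (n + 1) 1).foldl (fun acc i => acc.push i) #[]).size : Nat) : Int) 1,
      ∀ acc : Array Int,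
      (PySem.List.pyRange 0 ((sec.length : Nat) : Int) 1).foldl
        (fun ns j => if aGet ns i = PySem.List.pyGetD sec j 0
                     then aSet ns i 0 else ns) acc
      = sec.foldl (fun ns s => if aGet ns i = s then aSet ns i 0 else ns) acc := by
    intro i _ acc
    have := PySem.List.foldl_pyRange_pyGetD' sec 0
      (fun ns s => if aGet ns i = s then aSet ns i 0 else ns)
      acc (le_refl 0)
    simpa using this
  rw [PySem.List.foldl_congr_mem' _ _ _ _ hcong]
  have hmark := mark_loopA sec (PySem.List.pyRange 1 (n+1) 1) []
    ((PySem.List.pyRange 1 (n + 1) 1).foldl (fun acc i => acc.push i) #[]) (by simpa using h0)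
  simp only [List.length_nil, List.nil_append, Nat.cast_zero, zero_add] at hmark
  rw [← h0s] at hmark
  rcases hPre with ⟨hn, hm⟩ | ⟨hn, hm⟩
  · exact third_loopA n m sec _ hmark hn hm (fun ⟨a, b⟩ => hD ⟨a, hn, b⟩)
  · -- n ≤ 0 : empty wall, both sides zero
    have hnil : PySem.List.pyRange 1 (n+1) 1 = [] :=
      PySem.List.pyRange_one_eq_nil (by omega)
    have hsz : ((PySem.List.pyRange 0
        ((((PySem.List.pyRange 1 (n + 1) 1).foldl (fun acc i => acc.push i) #[]).size : Nat) : Int) 1).foldl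
        (fun ns i => sec.foldl (fun ns s => if aGet ns i = s then aSet ns i 0 else ns) ns)
        ((PySem.List.pyRange 1 (n + 1) 1).foldl (fun acc i => acc.push i) #[])).size = 0 := by
      rw [← Array.length_toList, hmark, hnil]
      simp
    rw [hsz]
    rw [PySem.List.pyRange_one_eq_nil (by omega : ((0:Nat):Int) + 1 ≤ m - 1),
        PySem.List.pyRange_one_eq_nil (by omega : n - m + 2 ≤ 1)]
    simp

theorem main_eq (n m : Int) (sec : List Int)
    (hPre : (1 ≤ n ∧ 1 ≤ m) ∨ (n ≤ 0 ∧ 2 ≤ m))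
    (hD : ¬(m = n + 1 ∧ 1 ≤ n ∧ n ∈ sec)) :
    solution n m sec = solution_alt n m sec := by
  rw [solution_count n m sec hPre hD]
  unfold solution_alt
  rw [keyB n m sec]

theorem solution_alt_D (n m : Int) (sec : List Int) (hm : m = n + 1) :
    solution_alt n m sec = 0 := by
  unfold solution_alt
  have hf : sec.filter (fun s => decide (1 ≤ s) && decide (s ≤ n - m + 1)) = [] := by
    rw [List.filter_eq_nil_iff]
    intro a _
    simp only [Bool.and_eq_true, decide_eq_true_eq, not_and]
    intro h1; omega
  rw [hf]
  rfl

theorem solution_D (n m : Int) (sec : List Int)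
    (hm : m = n + 1) (hn : 1 ≤ n) (hs : n ∈ sec) :
    solution n m sec = 1 := by
  unfold solution
  dsimp only
  have h0 : ((PySem.List.pyRange 1 (n + 1) 1).foldl (fun acc i => acc.push i) #[]).toList
      = PySem.List.pyRange 1 (n + 1) 1 := by
    rw [toList_push_foldl]; rfl
  have hcong : ∀ i ∈ PySem.List.pyRange 0
        ((((PySem.List.pyRange 1 (n + 1) 1).foldl (fun acc i => acc.push i) #[]).size : Nat) : Int) 1,
      ∀ acc : Array Int,
      (PySem.List.pyRange 0 ((sec.length : Nat) : Int) 1).foldl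
        (fun ns j => if aGet ns i = PySem.List.pyGetD sec j 0
                     then aSet ns i 0 else ns) acc
      = sec.foldl (fun ns s => if aGet ns i = s then aSet ns i 0 else ns) acc := by
    intro i _ acc
    have := PySem.List.foldl_pyRange_pyGetD' sec 0
      (fun ns s => if aGet ns i = s then aSet ns i 0 else ns)
      acc (le_refl 0)
    simpa using this
  rw [PySem.List.foldl_congr_mem' _ _ _ _ hcong]
  set A := (PySem.List.pyRange 0
      ((((PySem.List.pyRange 1 (n + 1) 1).foldl (fun acc i => acc.push i) #[]).size : Nat) : Int) 1).foldl
      (fun ns i => sec.foldl (fun ns s => if aGet ns i = s then aSet ns i 0 else ns) ns)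
      ((PySem.List.pyRange 1 (n + 1) 1).foldl (fun acc i => acc.push i) #[]) with hAdef
  set M := (PySem.List.pyRange 1 (n+1) 1).map (markf sec) with hM
  have hmark : A.toList = M := by
    rw [hAdef]
    have h0s : ((PySem.List.pyRange 1 (n + 1) 1).foldl (fun acc i => acc.push i) #[]).size
        = (PySem.List.pyRange 1 (n + 1) 1).length := by
      rw [← Array.length_toList, h0]
    rw [h0s]
    have := mark_loopA sec (PySem.List.pyRange 1 (n+1) 1) []
      ((PySem.List.pyRange 1 (n + 1) 1).foldl (fun acc i => acc.push i) #[]) (by simpa using h0)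
    simpa using this
  have hlen : M.length = n.toNat := by
    rw [hM, List.length_map, PySem.List.length_pyRange_one]; omega
  have hsize : A.size = n.toNat := by rw [← Array.length_toList, hmark, hlen]
  have hMget : ∀ (k : Nat), (hk : k < M.length) → M[k] = markf sec (1 + (k : Int)) := by
    intro k hk
    simp [hM, List.getElem_map, PySem.List.getElem_pyRange_one]
  have hlast : A.toList[A.size - 1]'(by rw [Array.length_toList]; omega) = 0 := by
    have : A.toList[A.size - 1]'(by rw [Array.length_toList]; omega)
        = M[A.size - 1]'(by omega) := by simp [hmark]
    rw [this, hMget _ (by omega)]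
    have he : (1 : Int) + ((A.size - 1 : Nat) : Int) = n := by omega
    rw [he]
    simp [markf, hs]
  have hsizeI : ((A.size : Nat) : Int) = n := by omega
  rw [hsizeI]
  have h1 : m - 1 = n := by omega
  rw [h1, PySem.List.pyRange_one_cons (by omega),
      PySem.List.pyRange_one_eq_nil (by omega)]
  simp only [List.foldl_cons, List.foldl_nil]
  have h2 : n - m = -1 := by omega
  rw [h2]
  have hgl : aGet A (-1) = 0 := by
    rw [aGet_neg_one _ (by omega), hlast]
  have hsl : (0:Int) ∈ (aSlice A (-1) n).toList := by
    rw [aSlice_toList_neg_one _ _ (by omega) (by omega)]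
    rw [List.drop_eq_getElem_cons (by rw [Array.length_toList]; omega :
        A.size - 1 < A.toList.length)]
    have h3 : n.toNat - (A.size - 1) = 1 := by omega
    rw [h3, List.take_succ_cons, hlast]
    exact List.mem_cons_self ..
  rw [if_pos ⟨hgl, hsl⟩]
  norm_num

-- ===== VERDICT =====
theorem solution_spec : Claim_unchanged_solution := by
  intro n m sec _ hPre hD
  exact main_eq n m sec hPre hD

theorem solution_changed : Claim_changed_solution := by
  unfold Claim_changed_solution; decide

theorem solution_tight : Claim_exact_solution := by
  intro n m sec _ _ hD
  rw [solution_D n m sec hD.1 hD.2.1 hD.2.2, solution_alt_D n m sec hD.1]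
  decide
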